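-- pv_equiv track=rewrite | github.com/LikhithBusam/automation | src/performance/prompt_optimization.py | compress_history
-- ===== SOURCE A (Python) =====
-- from typing import Any, Dict, List, Optional
--
-- def compress_history(
--
--     history: List[Dict[str, str]],
--     max_items: int = 10
-- ) -> List[Dict[str, str]]:
--     """
--     Compress conversation history.
--
--     Args:
--         history: Conversation history
--         max_items: Maximum items to keep
--
--     Returns:
--         Compressed history
--     """
--     if len(history) <= max_items:
--         return history
--
--     # Keep first and last items
--     keep_indices = set([0, len(history) - 1])
--
--     # Keep items with highest importance (longer messages)
--     remaining = max_items - 2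
--     if remaining > 0:
--         # Sort by length and keep top N
--         sorted_indices = sorted(
--             range(1, len(history) - 1),
--             key=lambda i: len(history[i].get('content', '')),
--             reverse=True
--         )
--         keep_indices.update(sorted_indices[:remaining])
--
--     # Return kept items in order
--     return [history[i] for i in sorted(keep_indices)]
-- ===== SOURCE B (Python) =====
-- def compress_history(history, max_items=10):
--     n = len(history)
--     if n <= max_items:
--         return history
--     out = [history[0]]
--     remaining = max_items - 2
--     if remaining > 0:
--         lens = sorted((len(d.get('content', '')) for d in history[1:n - 1]), reverse=True)
--         cutoff = lens[remaining - 1]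
--         quota = remaining - sum(1 for L in lens if L > cutoff)
--         taken = 0
--         for d in history[1:n - 1]:
--             L = len(d.get('content', ''))
--             if L > cutoff:
--                 out.append(d)
--             elif L == cutoff and taken < quota:
--                 out.append(d)
--                 taken += 1
--     if n > 1:
--         out.append(history[-1])
--     return out
-- ===== Notes on version B (the rewrite author's own statement) =====
-- stated objective: alternative
-- what changed: A fully sorts the middle indices by descending content length, takes a prefix, merges it into a set with the endpoints and re-sorts the indices; B instead computes the length cutoff (the remaining-th largest) plus a tie quota and builds the output in a single forward pass over the middle, keeping elements above the cutoff and the earliest ties, so no index set and no final re-sort are needed.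
import Mathlib
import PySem

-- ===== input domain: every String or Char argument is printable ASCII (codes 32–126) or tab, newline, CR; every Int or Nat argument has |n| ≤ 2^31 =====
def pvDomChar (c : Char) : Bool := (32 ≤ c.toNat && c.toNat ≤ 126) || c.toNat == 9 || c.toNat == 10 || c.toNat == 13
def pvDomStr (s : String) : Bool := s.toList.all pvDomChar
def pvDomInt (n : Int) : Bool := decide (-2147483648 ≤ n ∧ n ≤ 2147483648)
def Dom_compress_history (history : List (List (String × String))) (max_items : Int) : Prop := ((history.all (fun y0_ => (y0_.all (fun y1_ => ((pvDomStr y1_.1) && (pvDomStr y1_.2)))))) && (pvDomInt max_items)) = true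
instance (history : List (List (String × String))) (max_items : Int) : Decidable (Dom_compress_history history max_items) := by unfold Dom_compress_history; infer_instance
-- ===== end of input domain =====

-- B replaces A's full descending sort of the middle indices (then set-union and an index re-sort)
-- by a length-threshold selection in one forward pass over the middle, building the output in order.

-- shared helper: len(d.get('content', ''))
def chLen (d : List (String × String)) : Int :=
  PySem.Str.len ((PySem.Dict.mk d).getD "content" "")

-- ===== PORT A =====
def compress_history (history : List (List (String × String))) (max_items : Int) : List (List (String × String)) :=
  if PySem.List.len history ≤ max_items then history
  else
    let keep0 : PySem.Set Int := PySem.Set.ofList [0, PySem.List.len history - 1]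
    let remaining := max_items - 2
    let keep : PySem.Set Int :=
      if remaining > 0 then
        let sorted_indices :=
          PySem.List.sorted (PySem.List.pyRange 1 (PySem.List.len history - 1))
            (fun i => chLen (PySem.List.pyGetD history i [])) true
        PySem.Set.update keep0 (PySem.List.slice sorted_indices none (some remaining))
      else keep0
    (PySem.List.sorted keep (fun i => i) false).map (fun i => PySem.List.pyGetD history i [])

-- ===== PORT B =====
def compress_history_alt (history : List (List (String × String))) (max_items : Int) : List (List (String × String)) :=
  let n := PySem.List.len history
  if n ≤ max_items then history
  else
    let out := [PySem.List.pyGetD history 0 []]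
    let remaining := max_items - 2
    let out :=
      if remaining > 0 then
        let mid := PySem.List.slice history (some 1) (some (n - 1))
        let lens := PySem.List.sorted (mid.map chLen) (fun L => L) true
        let cutoff := PySem.List.pyGetD lens (remaining - 1) 0
        let quota := remaining - (lens.countP (fun L => decide (cutoff < L)) : Int)
        (mid.foldl
          (fun (s : List (List (String × String)) × Int) d =>
            if cutoff < chLen d then (s.1 ++ [d], s.2)
            else if chLen d = cutoff ∧ s.2 < quota then (s.1 ++ [d], s.2 + 1)
            else s)
          (out, 0)).1
      else out
    if 1 < n then out ++ [PySem.List.pyGetD history (-1) []] else out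

-- ===== PRECONDITION & SPEC =====
-- Pre_ excludes only empty history together with negative max_items, where Python A raises IndexError
-- (history[-1] on an empty list); Python B raises there as well.
def Pre_compress_history (history : List (List (String × String))) (max_items : Int) : Prop :=
  history ≠ [] ∨ 0 ≤ max_items
instance (history : List (List (String × String))) (max_items : Int) : Decidable (Pre_compress_history history max_items) := by unfold Pre_compress_history; infer_instance

def pvWitness_compress_history : (List (List (String × String))) × Int :=
  ([[("content", "aa")], [("content", "a")], [("content", "bbb")], [], [("content", "c")]], 3)

def Spec_compress_history (history : List (List (String × String))) (max_items : Int) (out : List (List (String × String))) : Prop := out = compress_history_alt history max_items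
instance (history : List (List (String × String))) (max_items : Int) (out : List (List (String × String))) : Decidable (Spec_compress_history history max_items out) := by unfold Spec_compress_history; infer_instance

-- ===== CLAIM (what is proved, stated in full; the proofs are below) =====
def Claim_equal_compress_history : Prop := ∀ (history : List (List (String × String))) (max_items : Int), Dom_compress_history history max_items → Pre_compress_history history max_items → Spec_compress_history history max_items (compress_history history max_items)

-- ===== LEMMAS AND PROOFS =====

theorem insertBy_congr {α : Type} (b1 b2 : α → α → Bool) (x : α) (ys : List α)
    (h : ∀ y ∈ ys, b1 x y = b2 x y) :
    PySem.List.insertBy b1 x ys = PySem.List.insertBy b2 x ys := by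
  induction ys with
  | nil => rfl
  | cons y ys ih =>
    simp only [PySem.List.insertBy]
    rw [h y (by simp)]
    split
    · rfl
    · rw [ih (fun z hz => h z (by simp [hz]))]

theorem foldl_insertBy_congr {α : Type} (b1 b2 : α → α → Bool) :
    ∀ (xs acc : List α),
      (∀ x ∈ xs, ∀ y ∈ acc, b1 x y = b2 x y) →
      xs.Pairwise (fun y x => b1 x y = b2 x y) →
      xs.foldl (fun a x => PySem.List.insertBy b1 x a) acc
        = xs.foldl (fun a x => PySem.List.insertBy b2 x a) acc := by
  intro xs
  induction xs with
  | nil => intro acc _ _; rfl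
  | cons x xs ih =>
    intro acc hacc hpw
    simp only [List.foldl_cons]
    rw [insertBy_congr b1 b2 x acc (hacc x (by simp))]
    rw [ih _ ?_ (List.Pairwise.of_cons hpw)]
    intro z hz y hy
    rcases (PySem.List.mem_insertBy _ _ _ _).mp hy with h | h
    · subst h; exact (List.pairwise_cons.mp hpw).1 z hz
    · exact hacc z (by simp [hz]) y h

theorem sorted_rev_congr {α : Type} (xs : List α) (k k' : α → Int)
    (h : xs.Pairwise (fun y x => decide (k y < k x) = decide (k' y < k' x))) :
    PySem.List.sorted xs k true = PySem.List.sorted xs k' true := by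
  rw [PySem.List.sorted_rev_eq_foldl_insertBy, PySem.List.sorted_rev_eq_foldl_insertBy]
  exact foldl_insertBy_congr _ _ xs [] (by simp) h

theorem pairwise_strict_of_le_nodup (s : List Int) (f : Int → Int)
    (hpw : s.Pairwise (fun a b => f b ≤ f a)) (hnd : s.Nodup)
    (hinj : ∀ a ∈ s, ∀ b ∈ s, f a = f b → a = b) :
    s.Pairwise (fun a b => f b < f a) := by
  rw [List.pairwise_iff_getElem] at hpw ⊢
  intro i j hi hj hij
  rcases lt_or_eq_of_le (hpw i j hi hj hij) with h | h
  · exact h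
  · exfalso
    have := hinj _ (s.getElem_mem hi) _ (s.getElem_mem hj) h.symm
    have h2 := (List.Nodup.getElem_inj_iff hnd).mp this
    omega

theorem take_mem_sorted_strict (f : Int → Int) :
    ∀ (s : List Int) (r : Nat) (i : Int), s.Pairwise (fun a b => f b < f a) → i ∈ s →
      (i ∈ s.take r ↔ s.countP (fun j => decide (f i < f j)) < r) := by
  intro s
  induction s with
  | nil => simp
  | cons x tl ih =>
    intro r i hpw hi
    have hhead : ∀ j ∈ tl, f j < f x := (List.pairwise_cons.mp hpw).1
    rcases List.mem_cons.mp hi with rfl | hi'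
    · have h0 : (i :: tl).countP (fun j => decide (f i < f j)) = 0 := by
        rw [List.countP_eq_zero]
        intro j hj
        rcases List.mem_cons.mp hj with rfl | hj'
        · simp
        · simp [not_lt.mpr (le_of_lt (hhead j hj'))]
      rw [h0]
      cases r with
      | zero => simp
      | succ r => simp
    · have hfi : f i < f x := hhead i hi'
      have hcount : (x :: tl).countP (fun j => decide (f i < f j))
          = tl.countP (fun j => decide (f i < f j)) + 1 := by
        rw [List.countP_cons]
        simp [hfi]
      rw [hcount]
      cases r with
      | zero => simp
      | succ r =>
        have hne : i ≠ x := by intro h; subst h; exact absurd hfi (lt_irrefl _)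
        rw [List.take_succ_cons]
        simp only [List.mem_cons, hne, false_or]
        rw [ih r i (List.Pairwise.of_cons hpw) hi']
        omega

theorem countP_disjoint_split {α : Type} (l : List α) (p q : α → Bool)
    (h : ∀ x ∈ l, ¬(p x = true ∧ q x = true)) :
    l.countP (fun x => p x || q x) = l.countP p + l.countP q := by
  induction l with
  | nil => simp
  | cons x l ih =>
    simp only [List.countP_cons]
    rw [ih (fun z hz => h z (by simp [hz]))]
    have := h x (by simp)
    by_cases hp : p x = true <;> by_cases hq : q x = true <;> simp_all <;> omega

theorem keyprime_lt_iff (n ky kx y x : Int) (hy0 : 0 ≤ y) (hyn : y < n) (hx0 : 0 ≤ x) (hxn : x < n) :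
    (ky * n - y < kx * n - x) ↔ (ky < kx ∨ (ky = kx ∧ x < y)) := by
  rcases lt_trichotomy ky kx with h | h | h
  · have h1 : (1 : Int) ≤ kx - ky := by omega
    have h2 : n ≤ (kx - ky) * n := le_mul_of_one_le_left (by omega) h1
    have h3 : (kx - ky) * n = kx * n - ky * n := by ring
    constructor
    · intro _; exact Or.inl h
    · intro _; omega
  · subst h; constructor
    · intro hlt; exact Or.inr ⟨rfl, by omega⟩
    · rintro (h | ⟨_, h⟩); · omega
      · omega
  · have h1 : (1 : Int) ≤ ky - kx := by omega
    have h2 : n ≤ (ky - kx) * n := le_mul_of_one_le_left (by omega) h1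
    have h3 : (ky - kx) * n = ky * n - kx * n := by ring
    constructor
    · intro _; omega
    · rintro (hh | ⟨hh, _⟩) <;> omega

theorem keyprime_inj (n ka kb a b : Int) (ha0 : 0 ≤ a) (han : a < n) (hb0 : 0 ≤ b) (hbn : b < n)
    (h : ka * n - a = kb * n - b) : a = b := by
  rcases lt_trichotomy ka kb with hk | hk | hk
  · have h1 : (1 : Int) ≤ kb - ka := by omega
    have h2 : n ≤ (kb - ka) * n := le_mul_of_one_le_left (by omega) h1
    have h3 : (kb - ka) * n = kb * n - ka * n := by ring
    omega
  · subst hk; omega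
  · have h1 : (1 : Int) ≤ ka - kb := by omega
    have h2 : n ≤ (ka - kb) * n := le_mul_of_one_le_left (by omega) h1
    have h3 : (ka - kb) * n = ka * n - kb * n := by ring
    omega

theorem mid_eq_map_get (history : List (List (String × String))) (hlen : 2 ≤ history.length) :
    PySem.List.slice history (some 1) (some ((history.length : Int) - 1))
      = (PySem.List.pyRange 1 ((history.length : Int) - 1)).map
          (fun i => PySem.List.pyGetD history i []) := by
  have hd : history.drop 1 ≠ [] := by
    intro h
    have := congrArg List.length h
    simp at this
    omega
  have h2 : (PySem.List.pyRange 1 ((history.length : Int))).map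
      (fun i => PySem.List.pyGetD history i []) = history.drop 1 := by
    have := PySem.List.map_pyGetD_pyRange history [] (a := 1) (by omega)
    simpa [PySem.List.len_eq] using this
  have h1 : PySem.List.pyRange 1 ((history.length : Int))
      = PySem.List.pyRange 1 ((history.length : Int) - 1) ++ [(history.length : Int) - 1] := by
    have := PySem.List.pyRange_one_succ_right (a := 1) (b := (history.length : Int) - 1) (by omega)
    rw [← this]
    norm_num
  rw [h1, List.map_append] at h2
  have h3 : history.drop 1 = (history.drop 1).dropLast ++ [(history.drop 1).getLast hd] :=
    (List.dropLast_append_getLast hd).symm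
  rw [h3] at h2
  have h4 := (List.append_inj' h2 (by simp)).1
  rw [PySem.List.slice_toNat history (by omega) (by omega), h4, List.dropLast_eq_take]
  congr 1
  simp

def selgo (key : Int → Int) (cutoff quota : Int) : List Int → Int → List Int
  | [], _ => []
  | i :: l, t =>
    if cutoff < key i then i :: selgo key cutoff quota l t
    else if key i = cutoff ∧ t < quota then i :: selgo key cutoff quota l (t + 1)
    else selgo key cutoff quota l t

theorem foldl_step_eq_selgo (get : Int → List (String × String)) (key : Int → Int)
    (cutoff quota : Int) (hkey : ∀ i, chLen (get i) = key i) :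
    ∀ (l : List Int) (acc : List (List (String × String))) (t : Int),
      ((l.map get).foldl
        (fun (s : List (List (String × String)) × Int) d =>
          if cutoff < chLen d then (s.1 ++ [d], s.2)
          else if chLen d = cutoff ∧ s.2 < quota then (s.1 ++ [d], s.2 + 1)
          else s) (acc, t)).1
      = acc ++ (selgo key cutoff quota l t).map get := by
  intro l
  induction l with
  | nil => intro acc t; simp [selgo]
  | cons i l ih =>
    intro acc t
    simp only [List.map_cons, List.foldl_cons, selgo, hkey i]
    by_cases h1 : cutoff < key i
    · simp only [if_pos h1]
      rw [ih]
      simp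
    · simp only [if_neg h1]
      by_cases h2 : key i = cutoff ∧ t < quota
      · simp only [if_pos h2]
        rw [ih]
        simp
      · simp only [if_neg h2]
        exact ih acc t

theorem selgo_range (key : Int → Int) (cutoff quota b : Int) :
    ∀ (k : Nat) (a t : Int), 1 ≤ a → (b - a).toNat ≤ k →
      t = min (((PySem.List.pyRange 1 a).countP (fun j => decide (key j = cutoff)) : Int)) quota →
      selgo key cutoff quota (PySem.List.pyRange a b) t
        = (PySem.List.pyRange a b).filter
            (fun i => decide (cutoff < key i) ||
              (decide (key i = cutoff) &&
                decide ((((PySem.List.pyRange 1 i).countP (fun j => decide (key j = cutoff))) : Int) < quota))) := by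
  intro k
  induction k with
  | zero =>
    intro a t ha hk _
    rw [PySem.List.pyRange_one_eq_nil (by omega)]
    rfl
  | succ k ih =>
    intro a t ha hk ht
    by_cases hab : a < b
    · rw [PySem.List.pyRange_one_cons hab]
      have hsucc : PySem.List.pyRange 1 (a + 1) = PySem.List.pyRange 1 a ++ [a] :=
        PySem.List.pyRange_one_succ_right (by omega)
      have hcnt : ((PySem.List.pyRange 1 (a + 1)).countP (fun j => decide (key j = cutoff)) : Int)
          = ((PySem.List.pyRange 1 a).countP (fun j => decide (key j = cutoff)) : Int)
            + (if key a = cutoff then 1 else 0) := by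
        rw [hsucc, List.countP_append]
        by_cases h : key a = cutoff <;> simp [h]
      simp only [selgo, List.filter_cons]
      by_cases h1 : cutoff < key a
      · have hne : ¬ key a = cutoff := by omega
        rw [if_pos h1, ih (a + 1) t (by omega) (by omega) (by rw [hcnt]; simp [hne]; omega)]
        simp [h1]
      · by_cases h2 : key a = cutoff ∧ t < quota
        · rw [if_neg h1, if_pos h2, ih (a + 1) (t + 1) (by omega) (by omega) (by rw [hcnt]; simp [h2.1]; omega)]
          have hc : ((PySem.List.pyRange 1 a).countP (fun j => decide (key j = cutoff)) : Int) < quota := by omega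
          simp [h2.1, hc]
        · have hinv : t = min (((PySem.List.pyRange 1 (a + 1)).countP (fun j => decide (key j = cutoff)) : Int)) quota := by
            by_cases h3 : key a = cutoff
            · rw [hcnt]; simp [h3]; omega
            · rw [hcnt]; simp [h3]; omega
          rw [if_neg h1, if_neg h2, ih (a + 1) t (by omega) (by omega) hinv]
          have hcond : (decide (cutoff < key a) ||
              (decide (key a = cutoff) &&
                decide ((((PySem.List.pyRange 1 a).countP (fun j => decide (key j = cutoff))) : Int) < quota))) = false := by
            by_cases h3 : key a = cutoff
            · have h4 : ¬ (((PySem.List.pyRange 1 a).countP (fun j => decide (key j = cutoff))) : Int) < quota :=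
                fun hc => h2 ⟨h3, by omega⟩
              simp [h1, h4]
            · simp [h1, h3]
          rw [hcond]
          simp
    · rw [PySem.List.pyRange_one_eq_nil (by omega)]
      rfl

theorem middle_select (key : Int → Int) (n r cutoff quota : Int)
    (h4 : 4 ≤ n) (hr1 : 1 ≤ r) (hrn : r ≤ n - 3)
    (hcut : cutoff = PySem.List.pyGetD
      (PySem.List.sorted ((PySem.List.pyRange 1 (n - 1)).map key) (fun L => L) true) (r - 1) 0)
    (hquota : quota = r - ((PySem.List.sorted ((PySem.List.pyRange 1 (n - 1)).map key) (fun L => L) true).countP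
      (fun L => decide (cutoff < L)) : Int)) :
    1 ≤ quota ∧ ∀ i ∈ PySem.List.pyRange 1 (n - 1),
    (decide (cutoff < key i) ||
      (decide (key i = cutoff) &&
        decide ((((PySem.List.pyRange 1 i).countP (fun j => decide (key j = cutoff))) : Int) < quota)))
    = decide (i ∈ (PySem.List.sorted (PySem.List.pyRange 1 (n - 1)) (fun j => key j * n - j) true).take r.toNat) := by
  set xs := PySem.List.pyRange 1 (n - 1) with hxs
  set lens := PySem.List.sorted (xs.map key) (fun L => L) true with hlens
  set S := PySem.List.sorted xs (fun j => key j * n - j) true with hS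
  set f : Int → Int := fun j => key j * n - j with hf
  have hxsmem : ∀ j ∈ xs, 1 ≤ j ∧ j < n - 1 := by
    intro j hj; exact PySem.List.mem_pyRange_one.mp hj
  have hxslen : xs.length = (n - 2).toNat := by
    rw [hxs, PySem.List.length_pyRange_one]; congr 1; omega
  have hxsnodup : xs.Nodup := (PySem.List.pairwise_lt_pyRange_one 1 (n - 1)).imp ne_of_lt
  have hlensperm : lens.Perm (xs.map key) := PySem.List.sorted_perm _ _ _
  have hlenslen : lens.length = (n - 2).toNat := by
    rw [hlensperm.length_eq, List.length_map, hxslen]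
  have hlenscount : ∀ p : Int → Bool, lens.countP p = xs.countP (fun j => p (key j)) := by
    intro p
    rw [hlensperm.countP_eq, List.countP_map]
    rfl
  have hrlen : (r - 1).toNat < lens.length := by rw [hlenslen]; omega
  have hcut' : cutoff = lens[(r - 1).toNat] := by
    rw [hcut, PySem.List.pyGetD_eq_getElem lens 0 (by omega) (by rw [hlenslen]; omega)]
  have hmono : ∀ (p q : Nat) (hpq : p ≤ q) (hq : q < lens.length), lens[q]'hq ≤ lens[p]'(by omega) := by
    intro p q hpq hq
    have hlpw : lens.Pairwise (fun a b => b ≤ a) := by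
      rw [hlens]; exact PySem.List.sorted_pairwise_rev (xs.map key) (fun L => L)
    rcases Nat.lt_or_ge p q with h | h
    · exact (List.pairwise_iff_getElem.mp hlpw) p q (by omega) hq h
    · have : p = q := by omega
      subst this; rfl
  -- F2: at least r elements of lens are ≥ cutoff
  have hF2 : r.toNat ≤ lens.countP (fun L => decide (cutoff ≤ L)) := by
    have hrle : r.toNat ≤ lens.length := by rw [hlenslen]; omega
    have htlen : (lens.take r.toNat).length = r.toNat := by
      rw [List.length_take]; omega
    have hall : ∀ x ∈ lens.take r.toNat, decide (cutoff ≤ x) = true := by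
      intro x hx
      rcases List.mem_iff_getElem.mp hx with ⟨p, hp, hpx⟩
      rw [List.getElem_take] at hpx
      have hple : (r - 1).toNat ≥ p := by omega
      have := hmono p (r - 1).toNat (by omega) hrlen
      rw [← hcut'] at this
      simp only [decide_eq_true_eq]
      omega
    calc r.toNat = (lens.take r.toNat).countP (fun L => decide (cutoff ≤ L)) := by
            rw [List.countP_eq_length.mpr hall, htlen]
      _ ≤ lens.countP (fun L => decide (cutoff ≤ L)) := (List.take_sublist _ _).countP_le
  -- F1: at most r-1 elements of lens are > cutoff
  have hF1 : (lens.countP (fun L => decide (cutoff < L)) : Int) ≤ r - 1 := by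
    have hsplit := List.take_append_drop (r - 1).toNat lens
    have : lens.countP (fun L => decide (cutoff < L))
        = (lens.take (r - 1).toNat).countP (fun L => decide (cutoff < L))
          + (lens.drop (r - 1).toNat).countP (fun L => decide (cutoff < L)) := by
      conv_lhs => rw [← hsplit]
      rw [List.countP_append]
    rw [this]
    have hz : (lens.drop (r - 1).toNat).countP (fun L => decide (cutoff < L)) = 0 := by
      rw [List.countP_eq_zero]
      intro x hx
      rcases List.mem_iff_getElem.mp hx with ⟨p, hp, hpx⟩
      rw [List.getElem_drop] at hpx
      have := hmono (r - 1).toNat ((r - 1).toNat + p) (by omega) (by rw [List.length_drop] at hp; omega)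
      rw [← hcut', hpx] at this
      simp only [decide_eq_true_eq]
      omega
    have hle : (lens.take (r - 1).toNat).countP (fun L => decide (cutoff < L)) ≤ (r - 1).toNat :=
      le_trans (List.countP_le_length) (by rw [List.length_take]; omega)
    omega
  refine ⟨by omega, fun i hi => ?_⟩
  -- S facts
  have hSperm : S.Perm xs := PySem.List.sorted_perm _ _ _
  have hSnodup : S.Nodup := (hSperm.nodup_iff).mpr hxsnodup
  have hSstrict : S.Pairwise (fun a b => f b < f a) := by
    apply pairwise_strict_of_le_nodup _ _ (PySem.List.sorted_pairwise_rev xs f) hSnodup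
    intro a ha b hb hab
    have hax := hxsmem a (hSperm.mem_iff.mp ha)
    have hbx := hxsmem b (hSperm.mem_iff.mp hb)
    exact keyprime_inj n (key a) (key b) a b (by omega) (by omega) (by omega) (by omega) hab
  have hitake : i ∈ S.take r.toNat ↔ S.countP (fun j => decide (f i < f j)) < r.toNat :=
    take_mem_sorted_strict f S r.toNat i hSstrict (hSperm.mem_iff.mpr hi)
  have hScount : S.countP (fun j => decide (f i < f j)) = xs.countP (fun j => decide (f i < f j)) :=
    hSperm.countP_eq _
  have hib := hxsmem i hi
  -- pointwise rewrite of the strict order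
  have hpt : ∀ j ∈ xs, decide (f i < f j)
      = (decide (key i < key j) || (decide (key j = key i) && decide (j < i))) := by
    intro j hj
    have hjb := hxsmem j hj
    have hiff2 : (f i < f j) ↔ (key i < key j ∨ (key i = key j ∧ j < i)) :=
      keyprime_lt_iff n (key i) (key j) i j (by omega) (by omega) (by omega) (by omega)
    rw [decide_eq_decide.mpr hiff2, Bool.decide_or, Bool.decide_and,
      decide_eq_decide.mpr (eq_comm : (key i = key j) ↔ (key j = key i)) ]
  have hcnt_split : xs.countP (fun j => decide (f i < f j))
      = xs.countP (fun j => decide (key i < key j))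
        + xs.countP (fun j => decide (key j = key i) && decide (j < i)) := by
    rw [List.countP_congr (fun x hx => by rw [hpt x hx])]
    apply countP_disjoint_split
    intro x hx ⟨ha, hb⟩
    simp only [decide_eq_true_eq, Bool.and_eq_true] at ha hb
    omega
  rcases lt_trichotomy (key i) cutoff with hlt | heq | hgt
  · -- key i < cutoff : not selected on either side
    have hge : r.toNat ≤ xs.countP (fun j => decide (f i < f j)) := by
      calc r.toNat ≤ lens.countP (fun L => decide (cutoff ≤ L)) := hF2
        _ = xs.countP (fun j => decide (cutoff ≤ key j)) := hlenscount _
        _ ≤ xs.countP (fun j => decide (f i < f j)) := by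
            apply List.countP_mono_left
            intro j hj hp
            have hjb := hxsmem j hj
            simp only [decide_eq_true_eq] at hp ⊢
            rw [hf]
            simp only []
            rw [keyprime_lt_iff n (key i) (key j) i j (by omega) (by omega) (by omega) (by omega)]
            left; omega
    have hnot : ¬ i ∈ S.take r.toNat := by
      rw [hitake, hScount]; omega
    have h1 : ¬ cutoff < key i := by omega
    have h2 : ¬ key i = cutoff := by omega
    simp [h1, h2, hnot]
  · -- key i = cutoff
    have habove : xs.countP (fun j => decide (key i < key j))
        = lens.countP (fun L => decide (cutoff < L)) := by
      rw [hlenscount]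
      apply List.countP_congr
      intro x hx
      simp only [decide_eq_true_eq]
      omega
    have hprefix : xs.countP (fun j => decide (key j = key i) && decide (j < i))
        = (PySem.List.pyRange 1 i).countP (fun j => decide (key j = cutoff)) := by
      rw [hxs, PySem.List.pyRange_one_append 1 i (n - 1) (by omega) (by omega), List.countP_append]
      have hz : (PySem.List.pyRange i (n - 1)).countP (fun j => decide (key j = key i) && decide (j < i)) = 0 := by
        rw [List.countP_eq_zero]
        intro x hx
        have := PySem.List.mem_pyRange_one.mp hx
        simp only [Bool.and_eq_true, decide_eq_true_eq, not_and]
        intro _; omega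
      rw [hz, Nat.add_zero]
      apply List.countP_congr
      intro x hx
      have := PySem.List.mem_pyRange_one.mp hx
      simp only [Bool.and_eq_true, decide_eq_true_eq]
      constructor
      · intro ⟨h, _⟩; omega
      · intro h; exact ⟨by omega, by omega⟩
    have h1 : ¬ cutoff < key i := by omega
    have hiff : (((PySem.List.pyRange 1 i).countP (fun j => decide (key j = cutoff)) : Int) < quota)
        ↔ (i ∈ S.take r.toNat) := by
      rw [hitake, hScount, hcnt_split, habove, hprefix, hquota]
      have h1' : ((r.toNat : Int)) = r := Int.toNat_of_nonneg (by omega)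
      omega
    by_cases h3 : (((PySem.List.pyRange 1 i).countP (fun j => decide (key j = cutoff)) : Int) < quota)
    · simp [heq, h3, hiff.mp h3]
    · have : ¬ i ∈ S.take r.toNat := fun hmem => h3 (hiff.mpr hmem)
      simp [heq, h3, this]
  · -- cutoff < key i : selected on both sides
    have hcle : xs.countP (fun j => decide (f i < f j))
        ≤ xs.countP (fun j => decide (cutoff < key j) && !decide (j = i)) := by
      apply List.countP_mono_left
      intro j hj hp
      have hjb := hxsmem j hj
      rw [hpt j hj] at hp
      simp only [Bool.or_eq_true, Bool.and_eq_true, decide_eq_true_eq, Bool.not_eq_true',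
        decide_eq_false_iff_not] at hp ⊢
      rcases hp with h | ⟨h, h'⟩
      · exact ⟨by omega, fun hji => by simp [hji] at h⟩
      · exact ⟨by omega, by omega⟩
    have hsplit2 : xs.countP (fun j => decide (cutoff < key j) && !decide (j = i))
          + xs.countP (fun j => decide (cutoff < key j) && decide (j = i))
        = xs.countP (fun j => decide (cutoff < key j)) := by
      rw [← countP_disjoint_split xs _ _ ?_]
      · apply List.countP_congr
        intro x hx
        by_cases h : x = i <;> by_cases h' : cutoff < key x <;> simp [h, h']
      · intro x hx ⟨ha, hb⟩
        simp only [Bool.and_eq_true, Bool.not_eq_true', decide_eq_false_iff_not,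
          decide_eq_true_eq] at ha hb
        exact ha.2 hb.2
    have hone : 1 ≤ xs.countP (fun j => decide (cutoff < key j) && decide (j = i)) := by
      rcases Nat.eq_zero_or_pos (xs.countP (fun j => decide (cutoff < key j) && decide (j = i))) with h | h
      · exfalso
        have := List.countP_eq_zero.mp h i hi
        simp [hgt] at this
      · omega
    have habove : xs.countP (fun j => decide (cutoff < key j))
        = lens.countP (fun L => decide (cutoff < L)) := by
      simpa using (hlenscount (fun L => decide (cutoff < L))).symm
    have hin : i ∈ S.take r.toNat := by
      rw [hitake, hScount]
      have : (r.toNat : Int) = r := Int.toNat_of_nonneg (by omega)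
      omega
    simp [hgt, hin]

-- ===== VERDICT (by name: the statement is the Claim_ definition above) =====
theorem compress_history_main (history : List (List (String × String))) (max_items : Int)
    (hpre : Pre_compress_history history max_items) :
    compress_history history max_items = compress_history_alt history max_items := by
  unfold compress_history compress_history_alt Pre_compress_history at *
  simp only [PySem.List.len_eq]
  by_cases hle : (history.length : Int) ≤ max_items
  · simp only [if_pos hle]
  · simp only [if_neg hle]
    have hne : history ≠ [] := by
      rcases hpre with h | h
      · exact h
      · intro hh; subst hh; simp at hle; omega
    have hn1 : (1 : Int) ≤ (history.length : Int) := by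
      have := List.length_pos_iff.mpr hne
      omega
    by_cases hr : max_items - 2 > 0
    · simp only [if_pos hr]
      set n : Int := (history.length : Int) with hn
      set key : Int → Int := fun i => chLen (PySem.List.pyGetD history i []) with hkey
      set get : Int → List (String × String) := fun i => PySem.List.pyGetD history i [] with hget
      have h4 : 4 ≤ n := by omega
      have hr1 : (1 : Int) ≤ max_items - 2 := by omega
      have hrn : max_items - 2 ≤ n - 3 := by omega
      set r : Int := max_items - 2 with hrdef
      set xs := PySem.List.pyRange 1 (n - 1) with hxs
      have hxsmem : ∀ j ∈ xs, 1 ≤ j ∧ j < n - 1 := fun j hj => PySem.List.mem_pyRange_one.mp hj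
      have hxspw : xs.Pairwise (· < ·) := PySem.List.pairwise_lt_pyRange_one 1 (n - 1)
      have hxsnodup : xs.Nodup := hxspw.imp ne_of_lt
      -- A's stable reverse sort by length = reverse sort by the injective combined key
      have hA1 : PySem.List.sorted xs key true
          = PySem.List.sorted xs (fun j => key j * n - j) true := by
        apply sorted_rev_congr
        refine List.Pairwise.imp_of_mem ?_ hxspw
        intro a b ha hb hab
        have hab1 := hxsmem a ha
        have hab2 := hxsmem b hb
        apply decide_eq_decide.mpr
        rw [keyprime_lt_iff n (key a) (key b) a b (by omega) (by omega) (by omega) (by omega)]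
        constructor
        · intro h; exact Or.inl h
        · rintro (h | ⟨_, h⟩)
          · exact h
          · omega
      set S := PySem.List.sorted xs (fun j => key j * n - j) true with hSdef
      have hSperm : S.Perm xs := PySem.List.sorted_perm _ _ _
      have hSnodup : S.Nodup := hSperm.nodup_iff.mpr hxsnodup
      have htnodup : (S.take r.toNat).Nodup := hSnodup.sublist (List.take_sublist _ _)
      have htmem : ∀ x ∈ S.take r.toNat, 1 ≤ x ∧ x < n - 1 := by
        intro x hx
        exact hxsmem x (hSperm.mem_iff.mp (List.mem_of_mem_take hx))
      have hdisj : ∀ x ∈ S.take r.toNat, x ∉ ([0, n - 1] : List Int) := by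
        intro x hx
        have := htmem x hx
        simp only [List.mem_cons, List.not_mem_nil, or_false]
        rintro (h | h) <;> omega
      set W := xs.filter (fun i => decide (i ∈ S.take r.toNat)) with hW
      have hWnodup : W.Nodup := hxsnodup.filter _
      have hWperm : W.Perm (S.take r.toNat) := by
        rw [List.perm_ext_iff_of_nodup hWnodup htnodup]
        intro a
        rw [hW, List.mem_filter]
        simp only [decide_eq_true_eq]
        constructor
        · intro h; exact h.2
        · intro h
          exact ⟨hSperm.mem_iff.mp (List.mem_of_mem_take h), h⟩
      have hkeep : PySem.List.sorted (([0, n - 1] : List Int) ++ S.take r.toNat) (fun i => i) false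
          = 0 :: (W ++ [n - 1]) := by
        apply PySem.List.sorted_eq_of_perm_of_pairwise_lt
        · have h1 : (W ++ [n - 1]).Perm ([n - 1] ++ W) := List.perm_append_comm
          have h2 : ([n - 1] ++ W).Perm ([n - 1] ++ S.take r.toNat) := List.Perm.append_left _ hWperm
          have h3 : (0 :: (W ++ [n - 1])).Perm (0 :: ([n - 1] ++ S.take r.toNat)) :=
            List.Perm.cons 0 (h1.trans h2)
          exact h3
        · rw [List.pairwise_cons]
          constructor
          · intro x hx
            rcases List.mem_append.mp hx with h | h
            · have := hxsmem x (List.mem_of_mem_filter h)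
              omega
            · simp only [List.mem_singleton] at h
              omega
          · rw [List.pairwise_append]
            refine ⟨List.Pairwise.sublist List.filter_sublist hxspw, by simp, ?_⟩
            intro x hx y hy
            simp only [List.mem_singleton] at hy
            have := hxsmem x (List.mem_of_mem_filter hx)
            omega
      have hlast : PySem.List.pyGetD history (-1) [] = get (n - 1) := by
        rw [PySem.List.pyGetD_neg_one history [] hne]
        show _ = PySem.List.pyGetD history (n - 1) []
        rw [PySem.List.pyGetD_eq_getElem history [] (by omega) (by omega)]
        rw [List.getLast_eq_getElem]
        congr 1
        omega
      -- identify B's middle slice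
      simp only [mid_eq_map_get history (by omega : 2 ≤ history.length), List.map_map]
      have hcomp : chLen ∘ (fun i => PySem.List.pyGetD history i []) = key := rfl
      simp only [hcomp]
      -- name B's cutoff and quota
      set lens := PySem.List.sorted (xs.map key) (fun L => L) true with hlens
      set cutoff := PySem.List.pyGetD lens (r - 1) 0 with hcutoff
      set quota := r - (lens.countP (fun L => decide (cutoff < L)) : Int) with hquota
      obtain ⟨hq1, hmid⟩ := middle_select key n r cutoff quota h4 hr1 hrn hcutoff hquota
      -- B's fold is a filtered selection over the middle indices
      rw [foldl_step_eq_selgo get key cutoff quota (fun i => rfl) xs [get 0] 0]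
      rw [selgo_range key cutoff quota (n - 1) (n - 1 - 1).toNat 1 0 (by omega) (by omega) ?hinv]
      case hinv =>
        rw [PySem.List.pyRange_one_eq_nil (by omega : (1:Int) ≤ 1)]
        simp
        omega
      rw [List.filter_congr hmid]
      -- A's sort and set bookkeeping
      rw [hA1, PySem.List.slice_to _ (by omega : (0:Int) ≤ r)]
      rw [PySem.Set.ofList_eq_self_of_nodup _ (by simp; omega)]
      rw [PySem.Set.update_eq_append_of_disjoint _ _ htnodup hdisj]
      rw [hkeep]
      rw [if_pos (by omega : (1:Int) < n), hlast]
      simp only [List.map_cons, List.map_append, List.map_nil, List.cons_append, List.nil_append]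
      rfl

    · simp only [if_neg hr]
      by_cases h2 : (2 : Int) ≤ (history.length : Int)
      · rw [PySem.Set.ofList_eq_self_of_nodup _ (by simp; omega)]
        rw [PySem.List.sorted_eq_of_perm_of_pairwise_lt _ ([0, (history.length : Int) - 1]) _
          (List.Perm.refl _) (by simp; omega)]
        have hlast : PySem.List.pyGetD history (-1) []
            = PySem.List.pyGetD history ((history.length : Int) - 1) [] := by
          rw [PySem.List.pyGetD_neg_one history [] hne]
          rw [PySem.List.pyGetD_eq_getElem history [] (by omega) (by omega)]
          rw [List.getLast_eq_getElem]
          congr 1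
          omega
        rw [if_pos (by omega : (1:Int) < (history.length : Int)), hlast]
        simp
      · have hone : (history.length : Int) = 1 := by omega
        rw [if_neg (by omega : ¬ (1:Int) < (history.length : Int))]
        rw [show ((history.length : Int) - 1) = 0 by omega]
        rw [show PySem.Set.ofList [(0 : Int), 0] = [0] from by decide]
        rw [show (PySem.List.sorted [(0 : Int)] (fun i => i) false) = [0] from by decide]
        simp

theorem compress_history_spec : Claim_equal_compress_history := by
  intro history max_items _ hpre
  unfold Spec_compress_history
  exact compress_history_main history max_items hpre
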